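-- pv_equiv track=rewrite | github.com/keepTryingPlease/VocabWidget | scripts/archive/build_master_list.py | best_result
-- ===== SOURCE A (Python) =====
-- PREFERRED_POS = ["adjective", "verb", "noun", "adverb"]
--
-- def best_result(results: list) -> dict | None:
--     if not results:
--         return None
--     for pos in PREFERRED_POS:
--         match = next((r for r in results if r.get("partOfSpeech") == pos), None)
--         if match:
--             return match
--     return results[0]
-- ===== SOURCE B (Python) =====
-- PREFERRED_POS = ["adjective", "verb", "noun", "adverb"]
-- _RANK = {pos: i for i, pos in enumerate(PREFERRED_POS)}
--
-- def best_result(results: list) -> dict | None: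
--     # Single pass: track the first result with the best (lowest) POS rank.
--     if not results:
--         return None
--     best = None
--     best_rank = len(PREFERRED_POS)
--     for r in results:
--         k = _RANK.get(r.get("partOfSpeech"), len(PREFERRED_POS))
--         if k < best_rank:
--             best, best_rank = r, k
--     return best if best is not None else results[0]
-- ===== Notes on version B (the rewrite author's own statement) =====
-- stated objective: alternative
-- what changed: Replaced A's outer loop over PREFERRED_POS with repeated scans of results by a single pass over results that tracks the first result with the lowest precomputed POS rank (strict < keeps first-occurrence ties); same measured cost since A usually exits its first scan early.
import Mathlib
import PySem

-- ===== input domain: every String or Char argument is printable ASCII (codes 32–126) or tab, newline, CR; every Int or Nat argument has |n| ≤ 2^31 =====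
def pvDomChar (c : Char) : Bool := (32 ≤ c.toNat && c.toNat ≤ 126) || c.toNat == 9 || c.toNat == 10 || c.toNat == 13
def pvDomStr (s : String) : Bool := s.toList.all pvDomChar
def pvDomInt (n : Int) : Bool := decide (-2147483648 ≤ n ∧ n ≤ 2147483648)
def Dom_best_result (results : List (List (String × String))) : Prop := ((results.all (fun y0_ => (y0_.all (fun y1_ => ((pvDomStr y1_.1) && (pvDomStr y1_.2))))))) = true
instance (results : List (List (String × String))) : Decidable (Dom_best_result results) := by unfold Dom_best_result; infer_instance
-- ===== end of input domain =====

-- One honest line: B replaces A's priority-by-priority rescans of `results` with a single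
-- pass tracking the first result of lowest POS rank; equivalence of return values is proved.

def PREFERRED_POS : List String := ["adjective", "verb", "noun", "adverb"]

-- ===== PORT A =====
-- next((r for r in results if r.get("partOfSpeech") == pos), None)
def brFind (results : List (List (String × String))) (pos : String) :
    Option (List (String × String)) :=
  results.find? (fun r => (PySem.Dict.mk r).get? "partOfSpeech" == some pos)

-- the `for pos in PREFERRED_POS` loop; `if match:` is Python truthiness (non-empty dict)
def brLoop : List String → List (List (String × String)) → Option (List (String × String))
  | [], results => PySem.List.pyGet? results 0
  | pos :: rest, results =>
      match brFind results pos with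
      | some m => if m.isEmpty then brLoop rest results else some m
      | none => brLoop rest results

def best_result (results : List (List (String × String))) : Option (List (String × String)) :=
  if results.isEmpty then none else brLoop PREFERRED_POS results

-- ===== PORT B =====
-- _RANK = {pos: i for i, pos in enumerate(PREFERRED_POS)}
def bRANK : PySem.Dict String Int :=
  PySem.Dict.mk [("adjective", 0), ("verb", 1), ("noun", 2), ("adverb", 3)]

-- _RANK.get(r.get("partOfSpeech"), 4) (a missing POS key can never be a _RANK key)
def bRank (r : List (String × String)) : Int :=
  match (PySem.Dict.mk r).get? "partOfSpeech" with
  | some p => bRANK.getD p 4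
  | none => 4

def bStep (st : Option (List (String × String)) × Int) (r : List (String × String)) :
    Option (List (String × String)) × Int :=
  let k := bRank r
  if k < st.2 then (some r, k) else st

def best_result_alt (results : List (List (String × String))) :
    Option (List (String × String)) :=
  if results.isEmpty then none
  else
    match (results.foldl bStep (none, 4)).1 with
    | some b => some b
    | none => PySem.List.pyGet? results 0

-- ===== PRECONDITION & SPEC =====
def Spec_best_result (results : List (List (String × String))) (out : Option (List (String × String))) : Prop := out = best_result_alt results
instance (results : List (List (String × String))) (out : Option (List (String × String))) : Decidable (Spec_best_result results out) := by unfold Spec_best_result; infer_instance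

-- ===== CLAIM (what is proved, stated in full; the proofs are below) =====
def Claim_equal_best_result : Prop := ∀ (results : List (List (String × String))), Dom_best_result results → Spec_best_result results (best_result results)

-- ===== LEMMAS AND PROOFS =====

-- minimum rank occurring in l, capped above by 5 (every rank is ≤ 4)
def mrk (l : List (List (String × String))) : Int :=
  l.foldr (fun r a => min (bRank r) a) 5

theorem mrk_cons (x : List (String × String)) (l : List (List (String × String))) :
    mrk (x :: l) = min (bRank x) (mrk l) := rfl

theorem bRANK_getD (p : String) :
    bRANK.getD p 4 =
      if p = "adjective" then 0 else if p = "verb" then 1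
      else if p = "noun" then 2 else if p = "adverb" then 3 else 4 := by
  rcases eq_or_ne p "adjective" with rfl | n1
  · decide
  rcases eq_or_ne p "verb" with rfl | n2
  · decide
  rcases eq_or_ne p "noun" with rfl | n3
  · decide
  rcases eq_or_ne p "adverb" with rfl | n4
  · decide
  have b1 : (("adjective" : String) == p) = false := by simp [Ne.symm n1]
  have b2 : (("verb" : String) == p) = false := by simp [Ne.symm n2]
  have b3 : (("noun" : String) == p) = false := by simp [Ne.symm n3]
  have b4 : (("adverb" : String) == p) = false := by simp [Ne.symm n4]
  simp [bRANK, PySem.Dict.getD, PySem.Dict.get?, List.find?, n1, n2, n3, n4, b1, b2, b3, b4]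

theorem bRank_nonneg (r : List (String × String)) : 0 ≤ bRank r := by
  cases h : (PySem.Dict.mk r).get? "partOfSpeech" with
  | none => simp [bRank, h]
  | some p => simp only [bRank, h, bRANK_getD]; split_ifs <;> norm_num

theorem bRank_le_four (r : List (String × String)) : bRank r ≤ 4 := by
  cases h : (PySem.Dict.mk r).get? "partOfSpeech" with
  | none => simp [bRank, h]
  | some p => simp only [bRank, h, bRANK_getD]; split_ifs <;> norm_num

theorem mrk_le (l : List (List (String × String))) {r} (h : r ∈ l) : mrk l ≤ bRank r := by
  induction l with
  | nil => cases h
  | cons x xs ih =>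
      rcases List.mem_cons.mp h with rfl | h
      · rw [mrk_cons]; exact min_le_left _ _
      · rw [mrk_cons]; exact le_trans (min_le_right _ _) (ih h)

theorem mrk_le_five (l : List (List (String × String))) : mrk l ≤ 5 := by
  induction l with
  | nil => simp [mrk]
  | cons x xs ih => rw [mrk_cons]; omega

theorem mrk_nonneg (l : List (List (String × String))) : 0 ≤ mrk l := by
  induction l with
  | nil => simp [mrk]
  | cons x xs ih =>
      rw [mrk_cons]
      have := bRank_nonneg x; omega

-- the fold computes: the first element of minimal rank, if that rank beats k
theorem fold_char (l : List (List (String × String)))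
    (b : Option (List (String × String))) (k : Int) (hk : k ≤ 5) :
    l.foldl bStep (b, k) =
      if mrk l < k then (l.find? (fun r => bRank r == mrk l), mrk l) else (b, k) := by
  induction l generalizing b k with
  | nil => simp [mrk]; omega
  | cons r l ih =>
      rw [List.foldl_cons, mrk_cons]
      by_cases h : bRank r < k
      · have hstep : bStep (b, k) r = (some r, bRank r) := by simp [bStep, h]
        rw [hstep, ih (some r) (bRank r) (le_trans (bRank_le_four r) (by norm_num))]
        by_cases h2 : mrk l < bRank r
        · have hmin : min (bRank r) (mrk l) = mrk l := by omega
          rw [if_pos h2, hmin, if_pos (by omega)]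
          have hne : (bRank r == mrk l) = false := by simp; omega
          rw [List.find?_cons, hne]
        · have hmin : min (bRank r) (mrk l) = bRank r := by omega
          rw [if_neg h2, hmin, if_pos h]
          have heq : (bRank r == bRank r) = true := by simp
          rw [List.find?_cons, heq]
      · have hstep : bStep (b, k) r = (b, k) := by simp [bStep, h]
        rw [hstep, ih b k hk]
        by_cases h2 : mrk l < k
        · have hmin : min (bRank r) (mrk l) = mrk l := by omega
          rw [if_pos h2, hmin, if_pos h2]
          have hne : (bRank r == mrk l) = false := by simp; omega
          rw [List.find?_cons, hne]
        · rw [if_neg h2, if_neg (by omega)]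

-- when the minimum rank is achieved, find? finds it
theorem find?_mrk_isSome (l : List (List (String × String))) (h : mrk l < 5) :
    (l.find? (fun r => bRank r == mrk l)).isSome := by
  have : ∃ r ∈ l, bRank r = mrk l := by
    induction l with
    | nil => simp [mrk] at h
    | cons x xs ih =>
        rw [mrk_cons] at h ⊢
        by_cases h2 : mrk xs < bRank x
        · have hmin : min (bRank x) (mrk xs) = mrk xs := by omega
          have hx := bRank_le_four x
          obtain ⟨r, hr, he⟩ := ih (by omega)
          exact ⟨r, List.mem_cons_of_mem _ hr, by rw [hmin]; exact he⟩
        · have hmin : min (bRank x) (mrk xs) = bRank x := by omega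
          exact ⟨x, List.mem_cons_self, by rw [hmin]⟩
  obtain ⟨r, hr, he⟩ := this
  rw [List.find?_isSome]
  exact ⟨r, hr, by simp [he]⟩

-- no element has a rank strictly below the minimum
theorem find?_below_none (l : List (List (String × String))) (j : Int) (h : j < mrk l) :
    l.find? (fun r => bRank r == j) = none := by
  rw [List.find?_eq_none]
  intro r hr
  have := mrk_le l hr
  simp; omega

-- A's per-pos predicate equals "rank = i"
theorem pred_eq (r : List (String × String)) :
    ∀ i pos, (i, pos) ∈ [((0:Int), "adjective"), (1, "verb"), (2, "noun"), (3, "adverb")] →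
      ((PySem.Dict.mk r).get? "partOfSpeech" == some pos) = (bRank r == i) := by
  intro i pos hmem
  cases h : (PySem.Dict.mk r).get? "partOfSpeech" with
  | none =>
      simp only [bRank, h]
      fin_cases hmem <;> decide
  | some p =>
      simp only [bRank, h, bRANK_getD]
      fin_cases hmem <;> · split_ifs with h1 h2 h3 h4 <;> simp_all

-- a result whose rank is below 4 is a non-empty dict
theorem ne_nil_of_rank_lt_four (r : List (String × String)) (h : bRank r < 4) :
    r.isEmpty = false := by
  cases r with
  | nil => exfalso; simp [bRank, PySem.Dict.get?] at h
  | cons x xs => rfl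

theorem brFind_eq (results : List (List (String × String))) (i : Int) (pos : String)
    (hmem : (i, pos) ∈ [((0:Int), "adjective"), (1, "verb"), (2, "noun"), (3, "adverb")]) :
    brFind results pos = results.find? (fun r => bRank r == i) := by
  unfold brFind
  congr 1
  funext r
  exact pred_eq r i pos hmem

-- ===== VERDICT (by name: the statement is the Claim_ definition above) =====
theorem best_result_spec : Claim_equal_best_result := by
  intro results _
  unfold Spec_best_result
  unfold best_result best_result_alt
  by_cases hnil : results.isEmpty
  · simp [hnil]
  · rw [if_neg hnil, if_neg hnil]
    rw [fold_char results none 4 (by norm_num)]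
    have h0 := mrk_nonneg results
    have h5 := mrk_le_five results
    show brLoop PREFERRED_POS results = _
    simp only [PREFERRED_POS, brLoop]
    rw [brFind_eq results 0 "adjective" (by decide), brFind_eq results 1 "verb" (by decide),
        brFind_eq results 2 "noun" (by decide), brFind_eq results 3 "adverb" (by decide)]
    by_cases e0 : mrk results = 0
    · obtain ⟨m, hm⟩ := Option.isSome_iff_exists.mp (find?_mrk_isSome results (by omega))
      rw [e0] at hm
      have hrank : bRank m = 0 := by have := List.find?_some hm; simpa using this
      rw [if_pos (by omega), e0, hm]
      simp [ne_nil_of_rank_lt_four m (by omega)]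
    · rw [find?_below_none results 0 (by omega)]
      by_cases e1 : mrk results = 1
      · obtain ⟨m, hm⟩ := Option.isSome_iff_exists.mp (find?_mrk_isSome results (by omega))
        rw [e1] at hm
        have hrank : bRank m = 1 := by have := List.find?_some hm; simpa using this
        rw [if_pos (by omega), e1, hm]
        simp [ne_nil_of_rank_lt_four m (by omega)]
      · rw [find?_below_none results 1 (by omega)]
        by_cases e2 : mrk results = 2
        · obtain ⟨m, hm⟩ := Option.isSome_iff_exists.mp (find?_mrk_isSome results (by omega))
          rw [e2] at hm
          have hrank : bRank m = 2 := by have := List.find?_some hm; simpa using this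
          rw [if_pos (by omega), e2, hm]
          simp [ne_nil_of_rank_lt_four m (by omega)]
        · rw [find?_below_none results 2 (by omega)]
          by_cases e3 : mrk results = 3
          · obtain ⟨m, hm⟩ := Option.isSome_iff_exists.mp (find?_mrk_isSome results (by omega))
            rw [e3] at hm
            have hrank : bRank m = 3 := by have := List.find?_some hm; simpa using this
            rw [if_pos (by omega), e3, hm]
            simp [ne_nil_of_rank_lt_four m (by omega)]
          · rw [find?_below_none results 3 (by omega)]
            rw [if_neg (by omega)]
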